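-- pv_equiv track=rewrite | github.com/quicycle/mart | arpy/arpy/utils/utils.py | reorder_allowed
-- ===== SOURCE A (Python) =====
-- def reorder_allowed(allowed, order="pBtThAqE"):
--     """
--     Shuffle the ordering of allowed, keeping 3-Vectors together.
--     NOTE: This assumes that the input is in pBtThAqE order to start.
--     """
--     p = ["p"]
--     t = ["0"]
--     h = [a for a in allowed if len(a) == 3 and "0" not in a]
--     q = [a for a in allowed if len(a) == 4]
--     B = [a for a in allowed if len(a) == 2 and "0" not in a]
--     T = [a for a in allowed if len(a) == 3 and "0" in a]
--     A = [a for a in allowed if len(a) == 1 and a not in ["p", "0"]]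
--     E = [a for a in allowed if len(a) == 2 and "0" in a]
--
--     groups = {"p": p, "t": t, "h": h, "q": q, "B": B, "T": T, "A": A, "E": E}
--     new = []
--     for group in order:
--         new += groups[group]
--     return new
-- ===== SOURCE B (Python) =====
-- def reorder_allowed(allowed, order="pBtThAqE"):
--     """Single pass over `allowed`: classify each element once instead of
--     six filtering passes, then concatenate the groups in `order`."""
--     h = []; q = []; B = []; T = []; A = []; E = []
--     for a in allowed:
--         n = len(a)
--         if n == 3:
--             (T if "0" in a else h).append(a)
--         elif n == 4:
--             q.append(a)
--         elif n == 2: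
--             (E if "0" in a else B).append(a)
--         elif n == 1 and a not in ("p", "0"):
--             A.append(a)
--     groups = {"p": ["p"], "t": ["0"], "h": h, "q": q, "B": B, "T": T, "A": A, "E": E}
--     new = []
--     for group in order:
--         new += groups[group]
--     return new
-- ===== Notes on version B (the rewrite author's own statement) =====
-- stated objective: alternative
-- what changed: B classifies each element once in a single pass with an if/elif chain that appends to its group, instead of A's six independent filtering passes over the whole list.
import Mathlib
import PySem

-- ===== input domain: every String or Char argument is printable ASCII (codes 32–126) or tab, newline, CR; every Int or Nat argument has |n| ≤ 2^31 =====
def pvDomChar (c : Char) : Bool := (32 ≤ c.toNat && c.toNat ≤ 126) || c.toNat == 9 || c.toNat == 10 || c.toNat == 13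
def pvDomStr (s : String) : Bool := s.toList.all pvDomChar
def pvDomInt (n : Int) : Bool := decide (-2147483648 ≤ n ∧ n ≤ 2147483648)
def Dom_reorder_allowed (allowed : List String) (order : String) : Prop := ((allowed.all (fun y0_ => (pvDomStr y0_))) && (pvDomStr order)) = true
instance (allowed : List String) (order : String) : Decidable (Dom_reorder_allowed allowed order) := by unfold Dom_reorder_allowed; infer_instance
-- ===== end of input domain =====

-- B replaces A's six filtering passes over `allowed` by ONE classifying pass; return values agree wherever A returns.

-- ===== PORT A =====
-- Python iterates `for group in order` over 1-char strings; we key the dict by Char, which is the same lookup.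
-- `groups[group]` raises KeyError for a char outside the eight keys — excluded by Pre_; `getD … []` is never the
-- value used inside Pre_.
def reorder_allowed (allowed : List String) (order : String) : List String :=
  let p := ["p"]
  let t := ["0"]
  let h := allowed.filter (fun a => PySem.Str.len a == 3 && !PySem.Str.isIn "0" a)
  let q := allowed.filter (fun a => PySem.Str.len a == 4)
  let B := allowed.filter (fun a => PySem.Str.len a == 2 && !PySem.Str.isIn "0" a)
  let T := allowed.filter (fun a => PySem.Str.len a == 3 && PySem.Str.isIn "0" a)
  let A := allowed.filter (fun a => PySem.Str.len a == 1 && !(a == "p" || a == "0"))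
  let E := allowed.filter (fun a => PySem.Str.len a == 2 && PySem.Str.isIn "0" a)
  let groups : PySem.Dict Char (List String) :=
    ((((((((PySem.Dict.empty).insert 'p' p).insert 't' t).insert 'h' h).insert 'q' q).insert
      'B' B).insert 'T' T).insert 'A' A).insert 'E' E
  order.toList.foldl (fun new g => new ++ groups.getD g []) []

-- ===== PORT B =====
-- the six local accumulator lists of Source B
structure PVGroups where
  h : List String
  q : List String
  B : List String
  T : List String
  A : List String
  E : List String
deriving Repr, DecidableEq

-- the body of Source B's single classifying loop (list.append = ++ [a])
def pvStep (g : PVGroups) (a : String) : PVGroups :=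
  let n := PySem.Str.len a
  if n == 3 then
    if PySem.Str.isIn "0" a then { g with T := g.T ++ [a] } else { g with h := g.h ++ [a] }
  else if n == 4 then { g with q := g.q ++ [a] }
  else if n == 2 then
    if PySem.Str.isIn "0" a then { g with E := g.E ++ [a] } else { g with B := g.B ++ [a] }
  else if n == 1 && !(a == "p" || a == "0") then { g with A := g.A ++ [a] }
  else g

def reorder_allowed_alt (allowed : List String) (order : String) : List String :=
  let g := allowed.foldl pvStep ⟨[], [], [], [], [], []⟩
  let groups : PySem.Dict Char (List String) :=
    ((((((((PySem.Dict.empty).insert 'p' ["p"]).insert 't' ["0"]).insert 'h' g.h).insert 'q' g.q).insert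
      'B' g.B).insert 'T' g.T).insert 'A' g.A).insert 'E' g.E
  order.toList.foldl (fun new c => new ++ groups.getD c []) []

-- ===== PRECONDITION & SPEC =====
-- Pre_ excludes exactly the inputs on which Python A raises KeyError: an `order` character outside the eight group keys.
def Pre_reorder_allowed (allowed : List String) (order : String) : Prop :=
  (order.toList.all (fun c => c == 'p' || c == 't' || c == 'h' || c == 'q' || c == 'B' || c == 'T' || c == 'A' || c == 'E')) = true
instance (allowed : List String) (order : String) : Decidable (Pre_reorder_allowed allowed order) := by
  unfold Pre_reorder_allowed; infer_instance
def pvWitness_reorder_allowed : List String × String := (["x", "0x", "xy", "xyz", "x0z", "abcd", "p", "0"], "pBtThAqE")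

def Spec_reorder_allowed (allowed : List String) (order : String) (out : List String) : Prop := out = reorder_allowed_alt allowed order
instance (allowed : List String) (order : String) (out : List String) : Decidable (Spec_reorder_allowed allowed order out) := by unfold Spec_reorder_allowed; infer_instance

-- ===== CLAIM (what is proved, stated in full; the proofs are below) =====
def Claim_equal_reorder_allowed : Prop := ∀ (allowed : List String) (order : String), Dom_reorder_allowed allowed order → Pre_reorder_allowed allowed order → Spec_reorder_allowed allowed order (reorder_allowed allowed order)

-- ===== LEMMAS AND PROOFS =====

-- closed form of Source B's classifying loop: each accumulator ends as its start value ++ the corresponding filter of A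
theorem pvStep_foldl (l : List String) (g : PVGroups) :
    l.foldl pvStep g =
      ⟨g.h ++ l.filter (fun a => PySem.Str.len a == 3 && !PySem.Str.isIn "0" a),
       g.q ++ l.filter (fun a => PySem.Str.len a == 4),
       g.B ++ l.filter (fun a => PySem.Str.len a == 2 && !PySem.Str.isIn "0" a),
       g.T ++ l.filter (fun a => PySem.Str.len a == 3 && PySem.Str.isIn "0" a),
       g.A ++ l.filter (fun a => PySem.Str.len a == 1 && !(a == "p" || a == "0")),
       g.E ++ l.filter (fun a => PySem.Str.len a == 2 && PySem.Str.isIn "0" a)⟩ := by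
  induction l generalizing g with
  | nil => simp
  | cons a l ih =>
    simp only [List.foldl_cons, ih, List.filter_cons]
    unfold pvStep
    generalize PySem.Str.isIn "0" a = b
    generalize PySem.Str.len a = n'
    generalize (a == "p" || a == "0") = c
    clear ih
    by_cases h3 : n' = 3 <;> by_cases h4 : n' = 4 <;> by_cases h2 : n' = 2 <;> by_cases h1 : n' = 1 <;>
      cases b <;> cases c <;> simp_all

theorem reorder_allowed_spec : Claim_equal_reorder_allowed := by
  intro allowed order _ _
  unfold Spec_reorder_allowed reorder_allowed reorder_allowed_alt
  rw [pvStep_foldl]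
  rfl
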